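-- pv_equiv track=rewrite | github.com/joergpichler/AdventOfCode | 2022/Day15/Day15.py | get_hole
-- ===== SOURCE A (Python) =====
-- def get_hole(ranges):
--     s = sorted(ranges)
--     current_max = s[0][1]
--     for r in s[1:]:
--         if r[1] <= current_max:
--             continue
--         if r[0] > current_max:
--             return r[0] - 1
--         current_max = r[1]
--     return None
-- ===== SOURCE B (Python) =====
-- def get_hole(ranges):
--     s = sorted(ranges)
--     # Pass 1: table of running maxima of the right endpoints (no interval merging).
--     m = s[0][1]
--     prefix = [m]
--     for _, hi in s[1:]:
--         m = m if hi < m else hi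
--         prefix.append(m)
--     # Pass 2: the first gap sits before the first interval lying entirely above the
--     # running maximum of everything before it.
--     return next((lo - 1 for (lo, hi), p in zip(s[1:], prefix) if min(lo, hi) > p), None)
-- ===== Notes on version B (the rewrite author's own statement) =====
-- stated objective: alternative
-- what changed: A merges coverage with a mutable current_max and returns early from inside the scan; B never merges: it first builds a table of running maxima of the right endpoints, then independently searches zip(s[1:], prefix) for the first interval whose both endpoints exceed the running maximum before it and returns its start minus 1.
import Mathlib
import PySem

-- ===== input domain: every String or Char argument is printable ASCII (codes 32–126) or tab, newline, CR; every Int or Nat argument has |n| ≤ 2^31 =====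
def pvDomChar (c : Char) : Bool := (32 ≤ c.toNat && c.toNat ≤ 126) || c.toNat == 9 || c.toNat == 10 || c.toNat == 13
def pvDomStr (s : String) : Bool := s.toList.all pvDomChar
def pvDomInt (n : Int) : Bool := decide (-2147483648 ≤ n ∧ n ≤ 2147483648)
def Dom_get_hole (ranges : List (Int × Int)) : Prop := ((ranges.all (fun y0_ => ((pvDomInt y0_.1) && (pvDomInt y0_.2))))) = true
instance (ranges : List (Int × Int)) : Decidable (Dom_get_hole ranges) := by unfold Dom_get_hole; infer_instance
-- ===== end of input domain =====

-- B replaces A's early-returning coverage merge by a prefix-maximum table plus an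
-- independent first-match search (alternative decomposition, same asymptotic cost).


-- ===== PORT A =====
-- A's for-loop over s[1:] with state current_max, early return on a gap.
def getHoleLoopA : List (Int × Int) → Int → Option Int
  | [], _ => none
  | r :: t, m =>
    if r.2 ≤ m then getHoleLoopA t m
    else if r.1 > m then some (r.1 - 1)
    else getHoleLoopA t r.2

def get_hole (ranges : List (Int × Int)) : Option Int :=
  match PySem.List.sorted2 ranges Prod.fst Prod.snd with
  | [] => none        -- unreachable under Pre_ (Python raises IndexError on [])
  | x :: rest => getHoleLoopA rest x.2

-- ===== PORT B =====
-- B's pass 1: the list of running maxima of right endpoints over s[1:]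
-- (the Python loop appending to `prefix`; `m :: …` is the seeded first entry).
def getHolePrefixB : List (Int × Int) → Int → List Int
  | [], _ => []
  | r :: t, m =>
    let m' := if r.2 < m then m else r.2
    m' :: getHolePrefixB t m'

def get_hole_alt (ranges : List (Int × Int)) : Option Int :=
  match PySem.List.sorted2 ranges Prod.fst Prod.snd with
  | [] => none        -- unreachable under Pre_ (Python raises IndexError on [])
  | x :: rest =>
    let pfx := x.2 :: getHolePrefixB rest x.2
    -- pass 2: first interval entirely above the running maximum before it
    match (rest.zip pfx).find? (fun rp => decide (min rp.1.1 rp.1.2 > rp.2)) with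
    | some (r, _) => some (r.1 - 1)
    | none => none

-- ===== PRECONDITION & SPEC =====
-- Pre_ excludes only the empty list, on which the Python A (and B) raises IndexError.
def Pre_get_hole (ranges : List (Int × Int)) : Prop := ranges ≠ []
instance (ranges : List (Int × Int)) : Decidable (Pre_get_hole ranges) := by unfold Pre_get_hole; infer_instance
def pvWitness_get_hole : (List (Int × Int)) := [((0 : Int), (2 : Int)), ((5 : Int), (7 : Int))]

def Spec_get_hole (ranges : List (Int × Int)) (out : Option Int) : Prop := out = get_hole_alt ranges
instance (ranges : List (Int × Int)) (out : Option Int) : Decidable (Spec_get_hole ranges out) := by unfold Spec_get_hole; infer_instance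

-- ===== CLAIM (what is proved, stated in full; the proofs are below) =====
def Claim_equal_get_hole : Prop := ∀ (ranges : List (Int × Int)), Dom_get_hole ranges → Pre_get_hole ranges → Spec_get_hole ranges (get_hole ranges)

-- ===== LEMMAS AND PROOFS =====

-- A's interleaved scan equals B's search over the prefix-maximum table:
-- A's current_max is exactly the running maximum paired with each interval.
theorem loopA_eq_find (t : List (Int × Int)) : ∀ (m : Int),
    getHoleLoopA t m =
      (match (t.zip (m :: getHolePrefixB t m)).find? (fun rp => decide (min rp.1.1 rp.1.2 > rp.2)) with
       | some (r, _) => some (r.1 - 1)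
       | none => none) := by
  induction t with
  | nil => intro m; simp [getHoleLoopA]
  | cons r t ih =>
    intro m
    simp only [getHoleLoopA, getHolePrefixB, List.zip_cons_cons, List.find?_cons]
    by_cases h2 : r.2 ≤ m
    · have hmin : ¬ (min r.1 r.2 > m) := by omega
      have hm' : (if r.2 < m then m else r.2) = m := by omega
      simp [h2, hmin, hm', ih m]
    · by_cases h1 : r.1 > m
      · have hmin : min r.1 r.2 > m := by omega
        simp [h2, h1, hmin]
      · have hmin : ¬ (min r.1 r.2 > m) := by omega
        have hm' : (if r.2 < m then m else r.2) = r.2 := by omega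
        simp [h2, h1, hmin, hm', ih r.2]

-- ===== VERDICT (by name: the statement is the Claim_ definition above) =====
theorem get_hole_spec : Claim_equal_get_hole := by
  intro ranges _ _
  unfold Spec_get_hole get_hole get_hole_alt
  cases h : PySem.List.sorted2 ranges Prod.fst Prod.snd with
  | nil => rfl
  | cons x rest => exact loopA_eq_find rest x.2
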